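-- pv_equiv track=rewrite | github.com/azwpayne/crypt | src/crypt/encrypt/symmetric_encrypt/block_cipher/cast5.py | _pad_sbox
-- ===== SOURCE A (Python) =====
-- def _pad_sbox(sbox, target_size=256):
--   """Pad S-box to target size by cycling existing values."""
--   if len(sbox) >= target_size:
--     return sbox[:target_size]
--   # Cycle through existing values to fill up to target_size
--   result = sbox[:]
--   i = 0
--   while len(result) < target_size:
--     result.append(sbox[i % len(sbox)])
--     i += 1
--   return result
-- ===== SOURCE B (Python) =====
-- def _pad_sbox(sbox, target_size=256):
--   """Pad S-box to target size by cycling existing values."""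
--   if len(sbox) >= target_size:
--     return sbox[:target_size]
--   reps = target_size // len(sbox) + 1
--   return (sbox * reps)[:target_size]
-- ===== Notes on version B (the rewrite author's own statement) =====
-- stated objective: idiomatic
-- what changed: Replaces the element-by-element while-append loop with a closed-form repetition: compute the needed number of copies with one floor division, build sbox*reps in one expression and slice to target_size.
import Mathlib
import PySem

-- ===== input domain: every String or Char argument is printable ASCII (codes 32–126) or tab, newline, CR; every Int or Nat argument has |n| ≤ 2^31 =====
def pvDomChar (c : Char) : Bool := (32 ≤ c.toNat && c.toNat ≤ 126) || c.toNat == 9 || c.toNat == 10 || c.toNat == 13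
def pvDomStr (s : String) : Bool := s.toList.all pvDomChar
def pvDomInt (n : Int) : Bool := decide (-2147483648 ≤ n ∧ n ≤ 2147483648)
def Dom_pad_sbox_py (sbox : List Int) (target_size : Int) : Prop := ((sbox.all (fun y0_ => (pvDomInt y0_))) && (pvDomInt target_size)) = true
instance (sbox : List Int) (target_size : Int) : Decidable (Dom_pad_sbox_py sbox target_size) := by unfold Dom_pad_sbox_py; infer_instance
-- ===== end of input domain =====

-- B replaces A's element-by-element while-append loop with one closed-form
-- repetition-and-slice (idiomatic; return value only, A does not mutate its argument).

-- ===== PORT A =====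
-- while len(result) < target_size: result.append(sbox[i % len(sbox)]); i += 1
-- i ≥ 0 and (inside Pre_) sbox ≠ [] in this loop, so Python's 'i % len(sbox)' is
-- Nat mod and the index is in range: getD is exact here.
def padLoopA (sbox : List Int) (target_size : Int) (result : List Int) (i : Nat) : List Int :=
  if (result.length : Int) < target_size then
    padLoopA sbox target_size (result ++ [sbox.getD (i % sbox.length) 0]) (i + 1)
  else result
termination_by target_size.toNat - result.length
decreasing_by simp; omega

def pad_sbox_py (sbox : List Int) (target_size : Int) : List Int :=
  if target_size ≤ (sbox.length : Int) then
    PySem.List.slice sbox none (some target_size)   -- sbox[:target_size]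
  else
    padLoopA sbox target_size sbox 0                -- result = sbox[:]; i = 0; while …

-- ===== PORT B =====
def pad_sbox_py_alt (sbox : List Int) (target_size : Int) : List Int :=
  if target_size ≤ (sbox.length : Int) then
    PySem.List.slice sbox none (some target_size)   -- sbox[:target_size]
  else
    -- reps = target_size // len(sbox) + 1;  (sbox * reps)[:target_size]
    PySem.List.slice
      (List.flatten (List.replicate (PySem.Int.floordiv target_size (sbox.length : Int) + 1).toNat sbox))
      none (some target_size)

-- ===== PRECONDITION & SPEC =====
-- Pre_ excludes exactly the inputs (sbox = [] with positive target_size) on which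
-- Python A raises ZeroDivisionError (i % len(sbox)); B also raises there.
def Pre_pad_sbox_py (sbox : List Int) (target_size : Int) : Prop :=
  sbox ≠ [] ∨ target_size ≤ 0
instance (sbox : List Int) (target_size : Int) : Decidable (Pre_pad_sbox_py sbox target_size) := by
  unfold Pre_pad_sbox_py; infer_instance

def pvWitness_pad_sbox_py : List Int × Int := ([5, 7], 6)

def Spec_pad_sbox_py (sbox : List Int) (target_size : Int) (out : List Int) : Prop :=
  out = pad_sbox_py_alt sbox target_size
instance (sbox : List Int) (target_size : Int) (out : List Int) : Decidable (Spec_pad_sbox_py sbox target_size out) := by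
  unfold Spec_pad_sbox_py; infer_instance

-- ===== CLAIM (what is proved, stated in full; the proofs are below) =====
def Claim_equal_pad_sbox_py : Prop := ∀ (sbox : List Int) (target_size : Int), Dom_pad_sbox_py sbox target_size → Pre_pad_sbox_py sbox target_size → Spec_pad_sbox_py sbox target_size (pad_sbox_py sbox target_size)

-- ===== LEMMAS AND PROOFS =====

-- sbox itself is the range-map of getD over its indices
lemma sbox_eq_range_map (sbox : List Int) :
    sbox = (List.range sbox.length).map (fun p => sbox.getD (p % sbox.length) 0) := by
  apply List.ext_getElem
  · simp
  · intro i h1 h2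
    simp at h2
    simp [List.getD, Nat.mod_eq_of_lt h2, List.getElem?_eq_getElem h2]

-- the repeated concatenation is the range-map of getD modulo the length
lemma flatten_replicate_eq (sbox : List Int) (r : Nat) :
    List.flatten (List.replicate r sbox)
      = (List.range (r * sbox.length)).map (fun p => sbox.getD (p % sbox.length) 0) := by
  induction r with
  | zero => simp
  | succ r ih =>
    rw [List.replicate_succ, List.flatten_cons, ih, Nat.succ_mul, Nat.add_comm,
        List.range_add, List.map_append]
    congr 1
    · conv_lhs => rw [sbox_eq_range_map sbox]
    · rw [List.map_map]
      apply List.map_congr_left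
      intro p _
      simp

-- closed form of A's while loop
lemma padLoopA_eq (sbox : List Int) (hs : sbox ≠ []) (target_size : Int)
    (result : List Int) (i : Nat) :
    padLoopA sbox target_size result i
      = result ++ (List.range (target_size.toNat - result.length)).map
          (fun k => sbox.getD ((i + k) % sbox.length) 0) := by
  by_cases h : (result.length : Int) < target_size
  · rw [padLoopA, if_pos h,
        padLoopA_eq sbox hs target_size (result ++ [sbox.getD (i % sbox.length) 0]) (i + 1)]
    have hlen : target_size.toNat - result.length
        = (target_size.toNat - (result ++ [sbox.getD (i % sbox.length) 0]).length) + 1 := by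
      simp; omega
    rw [hlen, List.range_succ_eq_map, List.map_cons, List.map_map, List.append_assoc,
        List.singleton_append]
    congr 2
    apply List.map_congr_left
    intro k _
    show sbox.getD ((i + 1 + k) % sbox.length) 0 = sbox.getD ((i + (k + 1)) % sbox.length) 0
    have h3 : i + 1 + k = i + (k + 1) := by omega
    rw [h3]
  · rw [padLoopA, if_neg h]
    have : target_size.toNat - result.length = 0 := by omega
    simp [this]
termination_by target_size.toNat - result.length
decreasing_by simp; omega

-- taking t elements of the full cycle is the range-map over t
lemma take_flatten_replicate (sbox : List Int) (r t : Nat) (h : t ≤ r * sbox.length) :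
    (List.flatten (List.replicate r sbox)).take t
      = (List.range t).map (fun p => sbox.getD (p % sbox.length) 0) := by
  rw [flatten_replicate_eq, ← List.map_take, List.take_range, Nat.min_eq_left h]

theorem pad_sbox_py_equal (sbox : List Int) (target_size : Int)
    (hpre : Pre_pad_sbox_py sbox target_size) :
    pad_sbox_py sbox target_size = pad_sbox_py_alt sbox target_size := by
  unfold pad_sbox_py pad_sbox_py_alt
  by_cases hc : target_size ≤ (sbox.length : Int)
  · rw [if_pos hc, if_pos hc]
  · rw [if_neg hc, if_neg hc]
    have hc' : (sbox.length : Int) < target_size := by omega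
    have hs : sbox ≠ [] := by
      rcases hpre with h | h
      · exact h
      · exfalso
        have h0 : (0 : Int) ≤ (sbox.length : Int) := by positivity
        omega
    have hn : 0 < sbox.length := List.length_pos_iff.mpr hs
    have ht0 : (0 : Int) ≤ target_size := by omega
    have htn : target_size = ((target_size.toNat : Nat) : Int) := by omega
    have hnt : sbox.length < target_size.toNat := by omega
    -- B side: reps and the slice
    have hfd : PySem.Int.floordiv target_size (sbox.length : Int)
        = ((target_size.toNat / sbox.length : Nat) : Int) := by
      rw [htn]; exact_mod_cast PySem.Int.floordiv_natCast target_size.toNat sbox.length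
    have hreps : (PySem.Int.floordiv target_size (sbox.length : Int) + 1).toNat
        = target_size.toNat / sbox.length + 1 := by
      rw [hfd]
      generalize target_size.toNat / sbox.length = q
      omega
    have hcov : target_size.toNat ≤ (target_size.toNat / sbox.length + 1) * sbox.length := by
      have h2 := Nat.mod_lt target_size.toNat hn
      calc target_size.toNat
          = sbox.length * (target_size.toNat / sbox.length) + target_size.toNat % sbox.length :=
            (Nat.div_add_mod target_size.toNat sbox.length).symm
        _ ≤ sbox.length * (target_size.toNat / sbox.length) + sbox.length :=
            Nat.add_le_add_left (Nat.le_of_lt h2) _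
        _ = (target_size.toNat / sbox.length + 1) * sbox.length := by ring
    rw [PySem.List.slice_to (hb := ht0), hreps,
        take_flatten_replicate sbox _ _ hcov]
    -- A side: loop closed form
    rw [padLoopA_eq sbox hs target_size sbox 0]
    simp only [Nat.zero_add]
    -- range t splits into the first n indices (= sbox) and the rest
    have hsplit : target_size.toNat = sbox.length + (target_size.toNat - sbox.length) := by omega
    conv_rhs => rw [hsplit, List.range_add, List.map_append]
    congr 1
    · exact sbox_eq_range_map sbox
    · rw [List.map_map]
      apply List.map_congr_left
      intro k _
      show sbox.getD (k % sbox.length) 0 = sbox.getD ((sbox.length + k) % sbox.length) 0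
      rw [Nat.add_mod_left]

-- ===== VERDICT (by name: the statement is the Claim_ definition above) =====
theorem pad_sbox_py_spec : Claim_equal_pad_sbox_py := by
  intro sbox target_size _ hpre
  unfold Spec_pad_sbox_py
  exact pad_sbox_py_equal sbox target_size hpre
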